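-- pv_equiv track=rewrite | github.com/pypi-data/pypi-mirror-271 | packages/pyodide-mkdocs-theme/pyodide_mkdocs_theme-0.7.1.tar.gz/pyodide_mkdocs_theme-0.7.1/pyodide_mkdocs_theme/pyodide_macros/plugin/maestro_indent.py | _extract_indentation
-- ===== SOURCE A (Python) =====
-- def _extract_indentation(txt:str, i_macro:int) -> int :
--     """
--     Step back in the markdown until a line feed or a non space char is found, then return
--     the index of the char where the line begins or the previous "non space sequence" ends
--     """
--     if not i_macro:
--         return ''
--
--     i = i_macro-1
--     while i>0 and txt[i].isspace() and txt[i]!='\n':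
--         i -= 1
--
--     n_indent = i_macro-i-1 if txt[i]=='\n' else 0
--     return ' ' * n_indent
-- ===== SOURCE B (Python) =====
-- def _extract_indentation(txt: str, i_macro: int) -> str:
--     """Single forward pass over txt[:i_macro]: track the run of whitespace since the
--     last newline (None while the current line is not pure whitespace / no newline seen).
--     A non-positive position has no text before it on its line, hence no indentation."""
--     if i_macro <= 0:
--         return ''
--     indent = None
--     for c in txt[:i_macro]:
--         if c == '\n':
--             indent = 0
--         elif indent is not None:
--             indent = indent + 1 if c.isspace() else None
--     return ' ' * indent if indent is not None else ''
-- ===== Notes on version B (the rewrite author's own statement) =====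
-- stated objective: idiomatic
-- what changed: Replaces A's guarded backward character scan (while i>0 and txt[i].isspace() and txt[i]!='\n') plus index arithmetic by a single forward pass over txt[:i_macro] that tracks the whitespace-run length since the last newline in one Optional accumulator.
import Mathlib
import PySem

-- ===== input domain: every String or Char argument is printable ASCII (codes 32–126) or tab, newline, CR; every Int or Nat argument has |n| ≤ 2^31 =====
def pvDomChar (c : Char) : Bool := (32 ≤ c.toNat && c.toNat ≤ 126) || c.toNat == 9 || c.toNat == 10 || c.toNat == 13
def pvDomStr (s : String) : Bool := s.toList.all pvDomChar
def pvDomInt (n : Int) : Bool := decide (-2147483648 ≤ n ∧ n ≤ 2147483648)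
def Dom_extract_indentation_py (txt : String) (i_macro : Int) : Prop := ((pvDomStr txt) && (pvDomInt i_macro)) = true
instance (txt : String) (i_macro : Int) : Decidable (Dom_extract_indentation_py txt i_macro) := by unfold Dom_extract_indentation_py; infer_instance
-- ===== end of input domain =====

-- B replaces A's guarded backward character scan by one forward fold over the prefix that
-- tracks the whitespace run since the last newline (objective: idiomatic single pass; return value only).

-- ===== PORT A =====
-- the loop guard's character test: txt[i].isspace() and txt[i] != '\n' (Python indexing, so i may be negative)
def aCond (l : List Char) (i : Int) : Bool :=
  match PySem.List.pyGet? l i with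
  | some c => PySem.Chars.isspace c && c != '\n'
  | none => false

-- the while-loop: step i down while i > 0 and the char is whitespace other than '\n'
-- (fuel i_macro.toNat bounds the iteration count; the loop itself stops at i ≤ 0)
def aLoop (l : List Char) : Nat → Int → Int
  | 0, i => i
  | f + 1, i => if 0 < i && aCond l i then aLoop l f (i - 1) else i

def extract_indentation_py (txt : String) (i_macro : Int) : String :=
  if i_macro = 0 then ""
  else
    let i : Int := aLoop txt.toList i_macro.toNat (i_macro - 1)
    let n_indent : Int :=
      if PySem.List.pyGet? txt.toList i = some '\n' then i_macro - i - 1 else 0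
    String.ofList (PySem.List.pyRepeat [' '] n_indent)

-- ===== PORT B =====
-- fold state: `some k` = the line read so far ends in k whitespace chars after a '\n'; `none` otherwise
def bStep (st : Option Nat) (c : Char) : Option Nat :=
  if c = '\n' then some 0
  else
    match st with
    | none => none
    | some k => if PySem.Chars.isspace c then some (k + 1) else none

def extract_indentation_py_alt (txt : String) (i_macro : Int) : String :=
  if i_macro ≤ 0 then ""
  else
    match (PySem.List.slice txt.toList none (some i_macro)).foldl bStep none with
    | some k => String.ofList (PySem.List.pyRepeat [' '] (k : Int))
    | none => ""

-- ===== PRECONDITION & SPEC =====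
-- Exactly the inputs A returns on: A raises IndexError iff i_macro ≠ 0 and the Python index
-- i_macro - 1 falls outside [-len(txt), len(txt)).
def Pre_extract_indentation_py (txt : String) (i_macro : Int) : Prop :=
  i_macro = 0 ∨ (1 - (txt.toList.length : Int) ≤ i_macro ∧ i_macro ≤ (txt.toList.length : Int))
instance (txt : String) (i_macro : Int) : Decidable (Pre_extract_indentation_py txt i_macro) := by
  unfold Pre_extract_indentation_py; infer_instance

def pvWitness_extract_indentation_py : String × Int := ("a\n  b", 4)

def Spec_extract_indentation_py (txt : String) (i_macro : Int) (out : String) : Prop := out = extract_indentation_py_alt txt i_macro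
instance (txt : String) (i_macro : Int) (out : String) : Decidable (Spec_extract_indentation_py txt i_macro out) := by unfold Spec_extract_indentation_py; infer_instance

-- ===== CLAIM (what is proved, stated in full; the proofs are below) =====
def Claim_equal_extract_indentation_py : Prop := ∀ (txt : String) (i_macro : Int), Dom_extract_indentation_py txt i_macro → Pre_extract_indentation_py txt i_macro → Spec_extract_indentation_py txt i_macro (extract_indentation_py txt i_macro)

-- ===== LEMMAS AND PROOFS =====

-- A's loop, restated on a Nat index (the proof's ladder; the port itself keeps Python's Int index)
def aDescendNat (l : List Char) : Nat → Nat
  | 0 => 0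
  | n + 1 => if aCond l ((n + 1 : Nat) : Int) then aDescendNat l n else n + 1

lemma aLoop_eq (l : List Char) : ∀ f n : Nat, n ≤ f → aLoop l f ((n : Nat) : Int) = ((aDescendNat l n : Nat) : Int) := by
  intro f
  induction f with
  | zero =>
    intro n hn
    interval_cases n
    simp [aLoop, aDescendNat]
  | succ f ih =>
    intro n hn
    cases n with
    | zero => simp [aLoop, aDescendNat]
    | succ m =>
      have hcast : ((m + 1 : Nat) : Int) = ((m : Nat) : Int) + 1 := by push_cast; ring
      simp only [aLoop, aDescendNat, hcast]
      by_cases hc : aCond l (((m : Nat) : Int) + 1) = true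
      · rw [if_pos (by simp only [hc, Bool.and_true, decide_eq_true_eq]; omega), if_pos hc]
        have h1 : ((m : Nat) : Int) + 1 - 1 = ((m : Nat) : Int) := by ring
        rw [h1, ih m (by omega)]
      · simp only [Bool.not_eq_true] at hc
        rw [if_neg (by simp [hc]), if_neg (by simp [hc])]
        omega

lemma aDescendNat_le (l : List Char) : ∀ n, aDescendNat l n ≤ n := by
  intro n
  induction n with
  | zero => simp [aDescendNat]
  | succ n ih =>
    have hcast : ((n + 1 : Nat) : Int) = ((n : Nat) : Int) + 1 := by push_cast; ring
    simp only [aDescendNat, hcast]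
    by_cases hc : aCond l (((n : Nat) : Int) + 1) = true
    · simp [hc]; omega
    · simp [hc]

lemma key (l : List Char) : ∀ m, m < l.length →
    (l.take (m + 1)).foldl bStep none
      = (if l[aDescendNat l m]? = some '\n' then some (m - aDescendNat l m) else none) := by
  intro m
  induction m with
  | zero =>
    intro h
    match l, h with
    | c :: t, _ =>
      simp [aDescendNat, bStep, List.foldl]
  | succ m ih =>
    intro h
    have hm : m < l.length := by omega
    have htake : l.take (m + 2) = l.take (m + 1) ++ [l[m + 1]] := by
      rw [List.take_add_one]
      simp [List.getElem?_eq_getElem h]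
    rw [htake, List.foldl_append, ih hm]
    have hcast : ((m + 1 : Nat) : Int) = ((m : Nat) : Int) + 1 := by push_cast; ring
    have hget : PySem.List.pyGet? l (((m : Nat) : Int) + 1) = some l[m + 1] := by
      rw [← hcast, PySem.List.pyGet?_natCast]
      exact List.getElem?_eq_getElem h
    by_cases hc : l[m + 1] = '\n'
    · -- char is '\n': loop stops at m+1, state resets to some 0
      have hcond : aCond l (((m : Nat) : Int) + 1) = false := by
        simp [aCond, hget, hc]
      have hA : aDescendNat l (m + 1) = m + 1 := by
        simp only [aDescendNat, hcast, hcond]; simp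
      rw [hA]
      simp [List.getElem?_eq_getElem h, hc, bStep]
    · by_cases hs : PySem.Chars.isspace l[m + 1] = true
      · -- whitespace, not '\n': loop continues, state extends
        have hcond : aCond l (((m : Nat) : Int) + 1) = true := by
          simp [aCond, hget, hs, hc]
        have hA : aDescendNat l (m + 1) = aDescendNat l m := by
          simp only [aDescendNat, hcast, hcond]; simp
        rw [hA]
        have hle := aDescendNat_le l m
        by_cases hnl : l[aDescendNat l m]? = some '\n'
        · simp only [hnl]
          simp [bStep, hc, hs]
          omega
        · simp [hnl, bStep, hc]
      · -- non-whitespace: loop stops at m+1, state dies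
        have hcond : aCond l (((m : Nat) : Int) + 1) = false := by
          simp [aCond, hget, hs]
        have hA : aDescendNat l (m + 1) = m + 1 := by
          simp only [aDescendNat, hcast, hcond]; simp
        rw [hA]
        have : l[m + 1]? = some l[m + 1] := List.getElem?_eq_getElem h
        simp [this, hc, bStep, hs]
        split <;> simp

-- ===== VERDICT (by name: the statement is the Claim_ definition above) =====
theorem extract_indentation_py_spec : Claim_equal_extract_indentation_py := by
  intro txt i_macro _ hpre
  unfold Pre_extract_indentation_py at hpre
  unfold Spec_extract_indentation_py extract_indentation_py extract_indentation_py_alt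
  set l := txt.toList with hl
  by_cases hz : i_macro = 0
  · simp [hz]
  · by_cases hpos : 1 ≤ i_macro
    · -- a genuine position: both sides read the m + 1 chars before it
      have hlen : i_macro ≤ (l.length : Int) := by rcases hpre with h | ⟨_, h⟩ <;> omega
      have hgt : ¬ i_macro ≤ 0 := by omega
      obtain ⟨m, hmi⟩ : ∃ m : Nat, i_macro = (m : Int) + 1 := ⟨(i_macro - 1).toNat, by omega⟩
      have hmlen : m < l.length := by omega
      have hfuel : i_macro.toNat = m + 1 := by omega
      have hstart : i_macro - 1 = ((m : Nat) : Int) := by omega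
      have hloop : aLoop l i_macro.toNat (i_macro - 1) = ((aDescendNat l m : Nat) : Int) := by
        rw [hfuel, hstart]
        exact aLoop_eq l (m + 1) m (by omega)
      have hslice : PySem.List.slice l none (some i_macro) = l.take (m + 1) := by
        rw [PySem.List.slice_to l (by omega), hfuel]
      simp only [if_neg hz, if_neg hgt, hloop, hslice, key l m hmlen]
      have hgi : PySem.List.pyGet? l ((aDescendNat l m : Nat) : Int) = l[aDescendNat l m]? := by
        rw [PySem.List.pyGet?_natCast]
      have hle := aDescendNat_le l m
      by_cases hnl : l[aDescendNat l m]? = some '\n'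
      · have harith : i_macro - ((aDescendNat l m : Nat) : Int) - 1 = ((m - aDescendNat l m : Nat) : Int) := by
          omega
        simp only [hgi, hnl, harith]
        simp [PySem.List.pyRepeat_singleton]
      · simp only [hgi, hnl]
        simp [PySem.List.pyRepeat_singleton]
    · -- a non-positive position: the loop guard i > 0 fails at once and the indent count is 0
      have hle0 : i_macro ≤ 0 := by omega
      have hfuel : i_macro.toNat = 0 := by omega
      have harith : i_macro - (i_macro - 1) - 1 = 0 := by ring
      simp only [if_neg hz, if_pos hle0, hfuel, aLoop, harith]
      simp [PySem.List.pyRepeat_singleton]
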